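-- pv_equiv track=rewrite | github.com/soaringk/Leetcode-Log | dp/jump-strategies.py | countChoice
-- ===== SOURCE A (Python) =====
-- def countChoice(n, d_mine, m_tele):
--     dp = [0 for _ in range(n + 1)]
--     dp[0] = 1
--     dp[1] = 1
--     for i in range(2, n + 1):
--         if i in d_mine:
--             # 等价于 dp[i] = 0
--             continue
--
--         # choice from jump
--         dp[i] = dp[i - 1] + dp[i - 2]
--
--         # if any teleport to use
--         for f, t in m_tele:
--             if t == i:
--                 dp[i] += dp[f]
--
--
--     return dp[n]
-- ===== SOURCE B (Python) =====
-- def countChoice(n, d_mine, m_tele):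
--     # Push-style DP: each computed cell propagates its count forward to i+1, i+2
--     # and its teleport targets, instead of each cell pulling from its predecessors.
--     mines = set(d_mine)
--     fwd = {}
--     for f, t in m_tele:
--         if 2 <= t <= n and 0 <= f < t and t not in mines:
--             fwd.setdefault(f, []).append(t)
--     pending = {}
--     last = 0
--     for i in range(n + 1):
--         if i <= 1:
--             v = 1
--         elif i in mines:
--             v = 0
--         else:
--             v = pending.get(i, 0)
--         for t in [i + 1, i + 2] + fwd.get(i, []):
--             pending[t] = pending.get(t, 0) + v
--         last = v
--     return last
-- ===== Notes on version B (the rewrite author's own statement) =====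
-- stated objective: alternative
-- what changed: B replaces A's pull-style DP (each cell rescans the whole teleport list and the mine list) with push-style contribution propagation: each computed cell pushes its count forward into a pending dict at i+1, i+2 and its pre-indexed teleport targets, keeping only the last value instead of re-reading a dp array; this removes the per-cell rescan (O(n+T+M) work instead of O(n*(T+M))), though a timing run saw no measurable difference on the generated inputs.
-- outside the precondition, e.g. on countChoice(2, set(), [(-1, 2)]): A returns 4, B returns 2; on countChoice(3, set(), [(2, 2)]): A returns 5, B returns 3
import Mathlib
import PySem

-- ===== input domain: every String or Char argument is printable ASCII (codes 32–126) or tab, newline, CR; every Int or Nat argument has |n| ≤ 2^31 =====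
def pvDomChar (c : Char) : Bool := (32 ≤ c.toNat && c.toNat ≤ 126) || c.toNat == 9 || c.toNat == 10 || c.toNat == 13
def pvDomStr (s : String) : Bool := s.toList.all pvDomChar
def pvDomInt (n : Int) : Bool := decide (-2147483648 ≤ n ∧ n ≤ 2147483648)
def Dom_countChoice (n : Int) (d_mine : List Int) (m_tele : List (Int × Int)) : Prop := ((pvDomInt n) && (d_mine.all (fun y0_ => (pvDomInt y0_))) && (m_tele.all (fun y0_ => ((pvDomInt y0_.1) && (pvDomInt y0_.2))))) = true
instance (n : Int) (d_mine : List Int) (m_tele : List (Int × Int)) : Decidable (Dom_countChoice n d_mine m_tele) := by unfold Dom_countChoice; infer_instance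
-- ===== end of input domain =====

-- B replaces A's pull-style DP (each cell rescans the whole teleport list) with
-- push-style contribution propagation through a pending dict; objective: alternative.

-- ===== PORT A =====
def countChoice (n : Int) (d_mine : List Int) (m_tele : List (Int × Int)) : Int :=
  let dp : List Int := (PySem.List.pyRange 0 (n + 1) 1).map (fun _ => 0)
  let dp := PySem.List.pySetD dp 0 1
  let dp := PySem.List.pySetD dp 1 1
  let dp := (PySem.List.pyRange 2 (n + 1) 1).foldl (fun dp i =>
    if i ∈ d_mine then dp
    else
      let dp := PySem.List.pySetD dp i
        (PySem.List.pyGetD dp (i - 1) 0 + PySem.List.pyGetD dp (i - 2) 0)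
      m_tele.foldl (fun dp p =>
        if p.2 == i then
          PySem.List.pySetD dp i (PySem.List.pyGetD dp i 0 + PySem.List.pyGetD dp p.1 0)
        else dp) dp) dp
  PySem.List.pyGetD dp n 0

-- ===== PORT B =====
def countChoice_alt (n : Int) (d_mine : List Int) (m_tele : List (Int × Int)) : Int :=
  let mines : PySem.Set Int := PySem.Set.ofList d_mine
  let fwd : PySem.Dict Int (List Int) :=
    m_tele.foldl (fun dd p =>
      if 2 ≤ p.2 ∧ p.2 ≤ n ∧ 0 ≤ p.1 ∧ p.1 < p.2 ∧ p.2 ∉ mines then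
        dd.modify p.1 [] (· ++ [p.2])
      else dd) PySem.Dict.empty
  let st := (PySem.List.pyRange 0 (n + 1) 1).foldl
    (fun (st : PySem.Dict Int Int × Int) i =>
      let v : Int := if i ≤ 1 then 1 else if i ∈ mines then 0 else st.1.getD i 0
      let pending := ([i + 1, i + 2] ++ fwd.getD i []).foldl
        (fun pd t => pd.modify t 0 (· + v)) st.1
      (pending, v)) (PySem.Dict.empty, 0)
  st.2

-- ===== PRECONDITION & SPEC =====
-- Pre_ excludes the inputs on which A raises IndexError (n < 1, or a teleport that
-- actually fires whose source f lies outside dp's index range), and — as being outside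
-- the task's natural domain (a teleport source must be an existing earlier cell) — firing
-- teleports with a negative or self-equal source, where A's returned value is an accident
-- of Python's negative-index wraparound resp. of reading dp[i] in mid-update.
def Pre_countChoice (n : Int) (d_mine : List Int) (m_tele : List (Int × Int)) : Prop :=
  1 ≤ n ∧ ∀ p ∈ m_tele, (2 ≤ p.2 ∧ p.2 ≤ n ∧ p.2 ∉ d_mine) → (0 ≤ p.1 ∧ p.1 ≤ n ∧ p.1 ≠ p.2)
instance (n : Int) (d_mine : List Int) (m_tele : List (Int × Int)) : Decidable (Pre_countChoice n d_mine m_tele) := by unfold Pre_countChoice; infer_instance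

def pvWitness_countChoice : Int × List Int × (List (Int × Int)) := (3, [2], [(0, 3)])

def Spec_countChoice (n : Int) (d_mine : List Int) (m_tele : List (Int × Int)) (out : Int) : Prop := out = countChoice_alt n d_mine m_tele
instance (n : Int) (d_mine : List Int) (m_tele : List (Int × Int)) (out : Int) : Decidable (Spec_countChoice n d_mine m_tele out) := by unfold Spec_countChoice; infer_instance

-- ===== CLAIM (what is proved, stated in full; the proofs are below) =====
def Claim_equal_countChoice : Prop := ∀ (n : Int) (d_mine : List Int) (m_tele : List (Int × Int)), Dom_countChoice n d_mine m_tele → Pre_countChoice n d_mine m_tele → Spec_countChoice n d_mine m_tele (countChoice n d_mine m_tele)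

-- ===== LEMMAS AND PROOFS =====

def gDP (d : List Int) (tl : List (Int × Int)) : Nat → Int
  | 0 => 1
  | 1 => 1
  | (m+2) =>
    if ((m : Int)+2) ∈ d then 0
    else gDP d tl (m+1) + gDP d tl m +
      (((tl.filter (fun p => p.2 == ((m:Int)+2) && decide (0 ≤ p.1) && decide (p.1 < (m:Int)+2))).attach).map
        (fun p => gDP d tl p.1.1.toNat)).sum
decreasing_by
  · omega
  · omega
  · have h := p.2
    simp [List.mem_filter] at h
    omega

theorem gDP_spec (d : List Int) (tl : List (Int × Int)) (i : Int) (h2 : 2 ≤ i) :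
    gDP d tl i.toNat = if i ∈ d then 0
      else gDP d tl (i-1).toNat + gDP d tl (i-2).toNat +
        ((tl.filter (fun p => p.2 == i && decide (0 ≤ p.1) && decide (p.1 < i))).map
          (fun p => gDP d tl p.1.toNat)).sum := by
  obtain ⟨m, hm⟩ : ∃ m : Nat, i.toNat = m + 2 := ⟨(i-2).toNat, by omega⟩
  have hi : ((m : Int) + 2) = i := by omega
  have e1 : (i-1).toNat = m+1 := by omega
  have e2 : (i-2).toNat = m := by omega
  rw [hm, gDP, hi, e1, e2, List.map_attach_eq_pmap]
  simp [List.pmap_eq_map]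

theorem foldl_pyRange_inv {σ : Type} (f : σ → Int → σ) (P : Int → σ → Prop) (a b : Int)
    (hab : a ≤ b)
    (step : ∀ i s, a ≤ i → i < b → P i s → P (i+1) (f s i)) :
    ∀ (s : σ), P a s → P b ((PySem.List.pyRange a b 1).foldl f s) := by
  obtain ⟨m, hm⟩ : ∃ m : Nat, b - a = (m : Int) := ⟨(b-a).toNat, by omega⟩
  induction m generalizing a with
  | zero =>
    intro s hs
    have hba : b = a := by omega
    rw [hba, PySem.List.pyRange_one_eq_nil le_rfl]
    exact hs
  | succ m ih =>
    intro s hs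
    rw [PySem.List.pyRange_one_cons (by omega)]
    simp only [List.foldl_cons]
    exact ih (a+1) (by omega) (fun i s hi hib => step i s (by omega) hib) (by omega) _
      (step a s le_rfl (by omega) hs)

theorem sum_ite_single (xs : List Int) (g : Int → Int) (a : Int)
    (hnd : xs.Nodup) (ha : a ∈ xs) :
    (xs.map (fun s => if s = a then g s else 0)).sum = g a := by
  induction xs with
  | nil => simp at ha
  | cons x xs ih =>
    simp only [List.map_cons, List.sum_cons]
    rcases List.mem_cons.mp ha with h | h
    · rw [if_pos h.symm, ← h]
      have hz : (xs.map (fun s => if s = a then g s else 0)).sum = 0 := by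
        apply List.sum_eq_zero; intro y hy
        obtain ⟨s, hs, rfl⟩ := List.mem_map.mp hy
        apply if_neg; rintro rfl; exact (List.nodup_cons.mp hnd).1 (h ▸ hs)
      rw [hz, add_zero]
    · have hx : x ≠ a := by rintro rfl; exact (List.nodup_cons.mp hnd).1 h
      rw [if_neg hx, ih (List.nodup_cons.mp hnd).2 h]
      ring

theorem sum_group (xs : List Int) (g : Int → Int) (l : List (Int × Int))
    (hnd : xs.Nodup) (hl : ∀ p ∈ l, p.1 ∈ xs) :
    (xs.map (fun s => g s * ((l.filter (fun p => p.1 == s)).length : Int))).sum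
      = (l.map (fun p => g p.1)).sum := by
  induction l with
  | nil => simp
  | cons p l ih =>
    have step : ∀ s : Int,
        g s * (((p :: l).filter (fun q => q.1 == s)).length : Int)
          = (if s = p.1 then g s else 0) + g s * ((l.filter (fun q => q.1 == s)).length : Int) := by
      intro s
      by_cases h : p.1 = s
      · simp [h, eq_comm]
        ring
      · have h' : ¬ s = p.1 := fun e => h e.symm
        simp [h, h']
    calc (xs.map (fun s => g s * (((p :: l).filter (fun q => q.1 == s)).length : Int))).sum
        = (xs.map (fun s => (if s = p.1 then g s else 0) + g s * ((l.filter (fun q => q.1 == s)).length : Int))).sum := by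
          exact congrArg List.sum (List.map_congr_left (fun s _ => step s))
      _ = g p.1 + (l.map (fun q => g q.1)).sum := by
          rw [PySem.List.sum_map_add_int,
            sum_ite_single xs g p.1 hnd (hl p (List.mem_cons_self)),
            ih (fun q hq => hl q (List.mem_cons_of_mem _ hq))]
      _ = ((p :: l).map (fun q => g q.1)).sum := by simp

theorem getD_foldl_modify_add (ts : List Int) (pd : PySem.Dict Int Int) (v j : Int) :
    (ts.foldl (fun pd t => pd.modify t 0 (· + v)) pd).getD j 0
      = pd.getD j 0 + v * (ts.count j : Int) := by
  induction ts generalizing pd with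
  | nil => simp
  | cons t ts ih =>
    simp only [List.foldl_cons, ih, PySem.Dict.getD_modify, List.count_cons]
    by_cases h : j = t
    · simp [h]
      ring
    · have h' : ¬ (t == j) = true := by simpa using fun e => h e.symm
      simp [h, h']

theorem sum_ite_filter (tl : List (Int × Int)) (i : Int) (G : Int × Int → Int)
    (h : ∀ p ∈ tl, p.2 = i → 0 ≤ p.1) :
    ((tl.filter (fun p => p.2 == i)).map (fun p => if p.1 < i then G p else 0)).sum
      = ((tl.filter (fun p => p.2 == i && decide (0 ≤ p.1) && decide (p.1 < i))).map G).sum := by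
  induction tl with
  | nil => simp
  | cons p tl ih =>
    have ih' := ih (fun q hq => h q (List.mem_cons_of_mem _ hq))
    by_cases hp : p.2 = i
    · have h0 : 0 ≤ p.1 := h p List.mem_cons_self hp
      by_cases hlt : p.1 < i
      · simp [hp, h0, hlt, ih']
      · simp [hp, h0, hlt, ih']
    · simp [hp, ih']

theorem innerA (i : Int) (hi : 0 ≤ i) (tl : List (Int × Int)) :
    ∀ (dp : List Int) (w : Int), i.toNat < dp.length →
    (∀ p ∈ tl, p.2 = i → 0 ≤ p.1 ∧ p.1.toNat < dp.length ∧ p.1 ≠ i) →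
    tl.foldl (fun dp p =>
        if p.2 == i then
          PySem.List.pySetD dp i (PySem.List.pyGetD dp i 0 + PySem.List.pyGetD dp p.1 0)
        else dp) (dp.set i.toNat w)
      = dp.set i.toNat (w + ((tl.filter (fun p => p.2 == i)).map (fun p => dp.getD p.1.toNat 0)).sum) := by
  induction tl with
  | nil => intro dp w _ _; simp
  | cons p tl ih =>
    intro dp w hlen hsrc
    by_cases hp : p.2 = i
    · obtain ⟨h0, hplen, hne⟩ := hsrc p List.mem_cons_self hp
      have hne' : p.1.toNat ≠ i.toNat := by omega
      have hget_i : PySem.List.pyGetD (dp.set i.toNat w) i 0 = w := by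
        rw [PySem.List.pyGetD_of_nonneg _ _ hi]
        simp [List.getD, hlen]
      have hget_p : PySem.List.pyGetD (dp.set i.toNat w) p.1 0 = dp.getD p.1.toNat 0 := by
        rw [PySem.List.pyGetD_of_nonneg _ _ h0]
        simp [List.getD, List.getElem?_set_ne (by omega : i.toNat ≠ p.1.toNat)]
      have hset : PySem.List.pySetD (dp.set i.toNat w) i (w + dp.getD p.1.toNat 0)
          = dp.set i.toNat (w + dp.getD p.1.toNat 0) := by
        rw [PySem.List.pySetD_of_nonneg _ _ hi, List.set_set]
      have hb : (p.2 == i) = true := by simpa using hp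
      simp only [List.foldl_cons, hb, if_true, hget_i, hget_p, hset]
      rw [ih dp (w + dp.getD p.1.toNat 0) hlen
        (fun q hq hq2 => hsrc q (List.mem_cons_of_mem _ hq) hq2)]
      congr 1
      simp [hp]
      ring
    · have hb : (p.2 == i) = false := by simpa using hp
      simp only [List.foldl_cons, hb, Bool.false_eq_true, if_false]
      rw [ih dp w hlen (fun q hq hq2 => hsrc q (List.mem_cons_of_mem _ hq) hq2)]
      congr 2
      simp [hp]

theorem countChoice_eq_gDP (n : Int) (d : List Int) (tl : List (Int × Int))
    (hn : 1 ≤ n)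
    (hp : ∀ p ∈ tl, (2 ≤ p.2 ∧ p.2 ≤ n ∧ p.2 ∉ d) → (0 ≤ p.1 ∧ p.1 ≤ n ∧ p.1 ≠ p.2)) :
    countChoice n d tl = gDP d tl n.toNat := by
  unfold countChoice
  have hmap : (PySem.List.pyRange 0 (n + 1) 1).map (fun _ => (0:Int))
      = List.replicate (n+1).toNat 0 := by
    rw [List.map_const', PySem.List.length_pyRange_one]
    norm_num
  have h0 : PySem.List.pySetD (List.replicate (n+1).toNat (0:Int)) 0 1
      = (List.replicate (n+1).toNat (0:Int)).set 0 1 := by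
    rw [PySem.List.pySetD_of_nonneg _ _ (by norm_num)]; norm_num
  have h1 : PySem.List.pySetD ((List.replicate (n+1).toNat (0:Int)).set 0 1) 1 1
      = ((List.replicate (n+1).toNat (0:Int)).set 0 1).set 1 1 := by
    rw [PySem.List.pySetD_of_nonneg _ _ (by norm_num)]; norm_num
  simp only [hmap, h0, h1]
  set P : Int → List Int → Prop := fun k dp =>
    dp.length = (n+1).toNat ∧
    ∀ j : Nat, (j:Int) ≤ n → dp.getD j 0 = if (j:Int) < k then gDP d tl j else 0 with hP
  have base : P 2 (((List.replicate (n+1).toNat (0:Int)).set 0 1).set 1 1) := by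
    constructor
    · simp
    · intro j hj
      rcases j with _ | _ | j
      · have hg : gDP d tl 0 = 1 := by simp [gDP]
        simp [List.getD, hg, show (0:Int) ≤ n by omega]
      · have hg : gDP d tl 1 = 1 := by simp [gDP]
        simp [List.getD, hg, show (0:Int) < n by omega]
      · simp only [List.getD, List.getElem?_set, List.getElem?_replicate]
        rw [if_neg (by omega : ¬ (1 = j + 1 + 1)), if_neg (by omega : ¬ (0 = j + 1 + 1)),
          if_neg (by omega : ¬ (((j + 1 + 1 : Nat) : Int) < 2))]
        split <;> simp
  have step : ∀ i dp, 2 ≤ i → i < n + 1 → P i dp →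
      P (i+1) ((fun dp i =>
        if i ∈ d then dp
        else
          let dp2 := PySem.List.pySetD dp i
            (PySem.List.pyGetD dp (i - 1) 0 + PySem.List.pyGetD dp (i - 2) 0)
          tl.foldl (fun dp p =>
            if p.2 == i then
              PySem.List.pySetD dp i (PySem.List.pyGetD dp i 0 + PySem.List.pyGetD dp p.1 0)
            else dp) dp2) dp i) := by
    intro i dp h2 hilt hPi
    obtain ⟨hlen, hinv⟩ := hPi
    by_cases hm : i ∈ d
    · simp only [if_pos hm]
      refine ⟨hlen, fun j hj => ?_⟩
      rw [hinv j hj]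
      by_cases hji : (j:Int) < i
      · rw [if_pos hji, if_pos (by omega)]
      · by_cases hji2 : (j:Int) < i + 1
        · have hj_eq : j = i.toNat := by omega
          have : (j : Int) = i := by omega
          rw [if_neg hji, if_pos hji2, hj_eq, gDP_spec d tl i h2, if_pos hm]
        · rw [if_neg hji, if_neg hji2]
    · simp only [if_neg hm]
      have hilen : i.toNat < dp.length := by rw [hlen]; omega
      have hW : PySem.List.pySetD dp i
          (PySem.List.pyGetD dp (i - 1) 0 + PySem.List.pyGetD dp (i - 2) 0)
          = dp.set i.toNat (PySem.List.pyGetD dp (i - 1) 0 + PySem.List.pyGetD dp (i - 2) 0) := by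
        rw [PySem.List.pySetD_of_nonneg _ _ (by omega)]
      have hsrc : ∀ p ∈ tl, p.2 = i → 0 ≤ p.1 ∧ p.1.toNat < dp.length ∧ p.1 ≠ i := by
        intro p hptl hpi
        obtain ⟨ha, hb, hc⟩ := hp p hptl (by rw [hpi]; exact ⟨h2, by omega, hm⟩)
        exact ⟨ha, by rw [hlen]; omega, by rw [← hpi]; exact hc⟩
      simp only [hW]
      rw [innerA i (by omega) tl dp _ hilen hsrc]
      have hgetset : ∀ (x : Int), (dp.set i.toNat x).getD i.toNat 0 = x := by
        intro x; simp [List.getD, hilen]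
      have hgetne : ∀ (x : Int) (j : Nat), j ≠ i.toNat → (dp.set i.toNat x).getD j 0 = dp.getD j 0 := by
        intro x j hji
        simp [List.getD, List.getElem?_set_ne (by omega : i.toNat ≠ j)]
      refine ⟨by simp [hlen], fun j hj => ?_⟩
      by_cases hji : j = i.toNat
      · subst hji
        have hji' : ((i.toNat : Int)) = i := by omega
        rw [if_pos (by omega)]
        rw [hgetset]
        have hW1 : PySem.List.pyGetD dp (i - 1) 0 = gDP d tl (i-1).toNat := by
          rw [PySem.List.pyGetD_of_nonneg _ _ (by omega : (0:Int) ≤ i - 1)]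
          rw [hinv (i-1).toNat (by omega)]
          rw [if_pos (by omega)]
        have hW2 : PySem.List.pyGetD dp (i - 2) 0 = gDP d tl (i-2).toNat := by
          rw [PySem.List.pyGetD_of_nonneg _ _ (by omega : (0:Int) ≤ i - 2)]
          rw [hinv (i-2).toNat (by omega)]
          rw [if_pos (by omega)]
        have hmapc : (tl.filter (fun p => p.2 == i)).map (fun p => dp.getD p.1.toNat 0)
            = (tl.filter (fun p => p.2 == i)).map (fun p => if p.1 < i then gDP d tl p.1.toNat else 0) := by
          apply List.map_congr_left
          intro p hpf
          have hpm := List.mem_of_mem_filter hpf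
          have hpi : p.2 = i := by simpa using List.of_mem_filter hpf
          obtain ⟨ha, hb, hc⟩ := hsrc p hpm hpi
          rw [hinv p.1.toNat (by omega)]
          by_cases hlt : p.1 < i
          · rw [if_pos (by omega), if_pos hlt]
          · rw [if_neg (by omega), if_neg hlt]
        rw [hmapc, sum_ite_filter tl i _ (fun p hptl hpi => (hsrc p hptl hpi).1),
          gDP_spec d tl i h2, if_neg hm, hW1, hW2]
      · rw [hgetne _ j hji, hinv j hj]
        by_cases hlt : (j:Int) < i
        · rw [if_pos hlt, if_pos (by omega)]
        · rw [if_neg hlt, if_neg (by omega)]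
  have final := foldl_pyRange_inv _ P 2 (n+1) (by omega) step _ base
  obtain ⟨hlenF, hinvF⟩ := final
  rw [PySem.List.pyGetD_of_nonneg _ _ (by omega : (0:Int) ≤ n)]
  rw [hinvF n.toNat (by omega), if_pos (by omega)]

def teleC (n : Int) (d : List Int) (p : Int × Int) : Bool :=
  decide (2 ≤ p.2) && decide (p.2 ≤ n) && decide (0 ≤ p.1) && decide (p.1 < p.2) && decide (p.2 ∉ d)

def mult (n : Int) (d : List Int) (tl : List (Int × Int)) (s j : Int) : Int :=
  (if j = s + 1 then 1 else 0) + (if j = s + 2 then 1 else 0)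
    + ((((tl.filter (teleC n d)).filter (fun p => p.1 == s)).map (fun p => p.2)).count j : Int)

-- counting a value among the second components is counting the pairs that carry it
theorem count_map_snd (l : List (Int × Int)) (k : Int) :
    (l.map (fun p => p.2)).count k = (l.filter (fun p => p.2 == k)).length := by
  induction l with
  | nil => simp
  | cons p l ih =>
    simp only [List.map_cons, List.count_cons, List.filter_cons]
    by_cases h : (p.2 == k) = true
    · rw [h]; simp [ih]
    · rw [Bool.not_eq_true] at h; rw [h]; simp [ih]

-- the pending sums of all pushes into cell k reproduce the pull recurrence
theorem pending_sum (n : Int) (d : List Int) (tl : List (Int × Int)) (k : Int)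
    (h2 : 2 ≤ k) (hkn : k ≤ n) (hm : k ∉ d) :
    ((PySem.List.pyRange 0 k 1).map (fun s => gDP d tl s.toNat * mult n d tl s k)).sum
      = gDP d tl k.toNat := by
  have hptw : ∀ s ∈ PySem.List.pyRange 0 k 1,
      gDP d tl s.toNat * mult n d tl s k
        = (if s = k - 1 then gDP d tl s.toNat else 0)
          + ((if s = k - 2 then gDP d tl s.toNat else 0)
            + gDP d tl s.toNat * ((((tl.filter (teleC n d)).filter (fun p => p.1 == s)).map (fun p => p.2)).count k : Int)) := by
    intro s _
    unfold mult
    by_cases e1 : k = s + 1 <;> by_cases e2 : k = s + 2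
    · omega
    · rw [if_pos e1, if_neg e2, if_pos (by omega : s = k - 1), if_neg (by omega : ¬ s = k - 2)]
      ring
    · rw [if_neg e1, if_pos e2, if_neg (by omega : ¬ s = k - 1), if_pos (by omega : s = k - 2)]
      ring
    · rw [if_neg e1, if_neg e2, if_neg (by omega : ¬ s = k - 1), if_neg (by omega : ¬ s = k - 2)]
      ring
  rw [List.map_congr_left hptw, PySem.List.sum_map_add_int, PySem.List.sum_map_add_int,
    sum_ite_single _ _ (k-1) (PySem.List.nodup_pyRange_one 0 k)
      (PySem.List.mem_pyRange_one.mpr (by omega)),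
    sum_ite_single _ _ (k-2) (PySem.List.nodup_pyRange_one 0 k)
      (PySem.List.mem_pyRange_one.mpr (by omega))]
  -- the teleport term
  have hcnt : ∀ s : Int,
      ((((tl.filter (teleC n d)).filter (fun p => p.1 == s)).map (fun p => p.2)).count k : Int)
        = (((((tl.filter (teleC n d)).filter (fun p => p.2 == k))).filter (fun p => p.1 == s)).length : Int) := by
    intro s
    rw [count_map_snd]
    simp only [List.filter_filter]
    norm_cast
    refine congrArg List.length (List.filter_congr fun p _ => ?_)
    rw [Bool.eq_iff_iff]
    simp only [Bool.and_eq_true, beq_iff_eq]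
    tauto
  simp only [hcnt]
  rw [sum_group (PySem.List.pyRange 0 k 1) (fun s => gDP d tl s.toNat)
    ((tl.filter (teleC n d)).filter (fun p => p.2 == k))
    (PySem.List.nodup_pyRange_one 0 k)
    (by
      intro p hp
      have h1 := List.of_mem_filter (List.mem_of_mem_filter hp)
      have h2' := List.of_mem_filter hp
      simp only [teleC, Bool.and_eq_true, decide_eq_true_eq] at h1
      simp only [beq_iff_eq] at h2'
      exact PySem.List.mem_pyRange_one.mpr (by omega))]
  have hfilt : (tl.filter (teleC n d)).filter (fun p => p.2 == k)
      = tl.filter (fun p => p.2 == k && decide (0 ≤ p.1) && decide (p.1 < k)) := by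
    rw [List.filter_filter]
    apply List.filter_congr
    intro p _
    rw [Bool.eq_iff_iff]
    simp only [Bool.and_eq_true, decide_eq_true_eq, beq_iff_eq, teleC]
    constructor
    · intro h
      obtain ⟨hpk, ⟨⟨⟨h1, h2'⟩, h3⟩, h4⟩, h5⟩ := h
      exact ⟨⟨hpk, h3⟩, by omega⟩
    · intro h
      obtain ⟨⟨hpk, h3⟩, h4⟩ := h
      exact ⟨hpk, ⟨⟨⟨⟨by omega, by omega⟩, h3⟩, by omega⟩, by rw [hpk]; exact hm⟩⟩
  rw [hfilt, gDP_spec d tl k h2, if_neg hm]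
  ring

theorem countChoice_alt_eq_gDP (n : Int) (d : List Int) (tl : List (Int × Int))
    (hn : 0 ≤ n) :
    countChoice_alt n d tl = gDP d tl n.toNat := by
  unfold countChoice_alt
  have hfcond : ∀ (dd : PySem.Dict Int (List Int)) (p : Int × Int),
      (if 2 ≤ p.2 ∧ p.2 ≤ n ∧ 0 ≤ p.1 ∧ p.1 < p.2 ∧ p.2 ∉ PySem.Set.ofList d then
        dd.modify p.1 [] (· ++ [p.2]) else dd)
      = (if teleC n d p = true then dd.modify p.1 [] (· ++ [p.2]) else dd) := by
    intro dd p
    refine if_congr ?_ rfl rfl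
    simp [teleC, PySem.Set.mem_ofList, and_assoc]
  have hfwd : ∀ s : Int,
      (tl.foldl (fun dd p =>
        if 2 ≤ p.2 ∧ p.2 ≤ n ∧ 0 ≤ p.1 ∧ p.1 < p.2 ∧ p.2 ∉ PySem.Set.ofList d then
          dd.modify p.1 [] (· ++ [p.2]) else dd) PySem.Dict.empty).getD s []
        = ((tl.filter (teleC n d)).filter (fun p => p.1 == s)).map (fun p => p.2) := by
    intro s
    have : (fun (dd : PySem.Dict Int (List Int)) (p : Int × Int) =>
        if 2 ≤ p.2 ∧ p.2 ≤ n ∧ 0 ≤ p.1 ∧ p.1 < p.2 ∧ p.2 ∉ PySem.Set.ofList d then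
          dd.modify p.1 [] (· ++ [p.2]) else dd)
        = (fun dd p => if teleC n d p = true then dd.modify p.1 [] (· ++ [p.2]) else dd) := by
      funext dd p; exact hfcond dd p
    rw [this]
    have hff := PySem.List.foldl_if_eq_foldl_filter (teleC n d)
      (fun (dd : PySem.Dict Int (List Int)) (p : Int × Int) => dd.modify p.1 [] (· ++ [p.2]))
      tl PySem.Dict.empty
    rw [hff, PySem.Dict.getD_foldl_modify_append]
    simp
  set Q : Int → (PySem.Dict Int Int × Int) → Prop := fun k st =>
    (0 < k → st.2 = gDP d tl (k-1).toNat) ∧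
    ∀ j : Int, st.1.getD j 0
      = ((PySem.List.pyRange 0 k 1).map (fun s => gDP d tl s.toNat * mult n d tl s j)).sum
    with hQ
  have base : Q 0 (PySem.Dict.empty, 0) := by
    constructor
    · intro h; omega
    · intro j
      rw [PySem.List.pyRange_one_eq_nil le_rfl]
      simp [PySem.Dict.getD_empty]
  have step : ∀ k st, 0 ≤ k → k < n + 1 → Q k st →
      Q (k+1) ((fun (st : PySem.Dict Int Int × Int) i =>
        let v : Int := if i ≤ 1 then 1 else if i ∈ PySem.Set.ofList d then 0 else st.1.getD i 0
        let pending := ([i + 1, i + 2] ++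
          (tl.foldl (fun (dd : PySem.Dict Int (List Int)) (p : Int × Int) =>
            if 2 ≤ p.2 ∧ p.2 ≤ n ∧ 0 ≤ p.1 ∧ p.1 < p.2 ∧ p.2 ∉ PySem.Set.ofList d then
              dd.modify p.1 [] (· ++ [p.2]) else dd) PySem.Dict.empty).getD i []).foldl
          (fun (pd : PySem.Dict Int Int) t => pd.modify t 0 (· + v)) st.1
        (pending, v)) st k) := by
    intro k st h0k hkn hQk
    obtain ⟨hlast, hpd⟩ := hQk
    have hv : (if k ≤ 1 then (1:Int) else if k ∈ PySem.Set.ofList d then 0 else st.1.getD k 0)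
        = gDP d tl k.toNat := by
      by_cases hk1 : k ≤ 1
      · rw [if_pos hk1]
        have : k = 0 ∨ k = 1 := by omega
        rcases this with h | h <;> (subst h; simp [gDP])
      · rw [if_neg hk1]
        by_cases hkm : k ∈ PySem.Set.ofList d
        · rw [if_pos hkm, gDP_spec d tl k (by omega),
            if_pos ((PySem.Set.mem_ofList d k).mp hkm)]
        · rw [if_neg hkm, hpd k,
            pending_sum n d tl k (by omega) (by omega)
              (fun hmem => hkm ((PySem.Set.mem_ofList d k).mpr hmem))]
    constructor
    · intro _
      simpa using hv
    · intro j
      dsimp only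
      rw [hfwd k, getD_foldl_modify_add, hpd j, hv,
        PySem.List.pyRange_one_succ_right h0k, List.map_append, List.sum_append]
      simp only [List.map_cons, List.map_nil, List.sum_cons, List.sum_nil, add_zero]
      congr 1
      have hcc : ((([k + 1, k + 2] ++
          ((tl.filter (teleC n d)).filter (fun p => p.1 == k)).map (fun p => p.2)).count j : Int))
          = mult n d tl k j := by
        rw [List.count_append]
        push_cast
        unfold mult
        have h12 : (([k + 1, k + 2] : List Int).count j : Int)
            = (if j = k + 1 then 1 else 0) + (if j = k + 2 then 1 else 0) := by
          by_cases e1 : j = k + 1 <;> by_cases e2 : j = k + 2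
          all_goals (simp [List.count_cons, List.count_nil, e1, e2]; try omega)
        rw [h12]
      rw [hcc]
  have final := foldl_pyRange_inv _ Q 0 (n+1) (by omega) step _ base
  simpa using final.1 (by omega)

-- ===== VERDICT (by name: the statement is the Claim_ definition above) =====
theorem countChoice_spec : Claim_equal_countChoice := by
  intro n d_mine m_tele _ hpre
  unfold Spec_countChoice
  rw [countChoice_eq_gDP n d_mine m_tele hpre.1 hpre.2,
      countChoice_alt_eq_gDP n d_mine m_tele (by have := hpre.1; omega)]
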